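-- pv_equiv track=rewrite | github.com/yomihime/CharaPicker | utils/ffmpeg_detection.py | pick_device
-- ===== SOURCE A (Python) =====
-- def pick_device(candidates: list[str], keywords: list[str]) -> str:
--     lowered = [keyword.lower() for keyword in keywords]
--     for candidate in candidates:
--         source = candidate.lower()
--         if all(keyword in source for keyword in lowered):
--             return candidate
--     for candidate in candidates:
--         source = candidate.lower()
--         if any(keyword in source for keyword in lowered):
--             return candidate
--     return ""
-- ===== SOURCE B (Python) =====
-- def pick_device(candidates: list[str], keywords: list[str]) -> str:
--     lowered = [keyword.lower() for keyword in keywords]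
--     fallback = None
--     for candidate in candidates:
--         source = candidate.lower()
--         if all(keyword in source for keyword in lowered):
--             return candidate
--         if fallback is None and any(keyword in source for keyword in lowered):
--             fallback = candidate
--     return fallback if fallback is not None else ""
-- ===== Notes on version B (the rewrite author's own statement) =====
-- stated objective: alternative
-- what changed: Single pass over candidates recording the first any-match as a fallback while still returning the first all-match immediately, instead of A's two full passes; same asymptotic cost, each candidate lowered at most once.
import Mathlib
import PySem

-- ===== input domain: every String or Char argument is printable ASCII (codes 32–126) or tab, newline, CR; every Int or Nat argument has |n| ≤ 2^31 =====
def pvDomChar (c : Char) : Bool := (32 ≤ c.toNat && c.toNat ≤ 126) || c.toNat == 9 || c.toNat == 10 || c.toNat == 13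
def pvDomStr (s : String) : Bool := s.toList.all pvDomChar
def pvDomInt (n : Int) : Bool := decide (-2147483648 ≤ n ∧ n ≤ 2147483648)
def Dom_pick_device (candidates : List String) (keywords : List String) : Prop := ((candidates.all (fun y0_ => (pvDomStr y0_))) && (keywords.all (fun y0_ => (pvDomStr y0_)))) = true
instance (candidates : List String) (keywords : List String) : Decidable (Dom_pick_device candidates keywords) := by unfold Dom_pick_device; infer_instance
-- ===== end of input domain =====

-- B makes one pass (first all-match returned immediately, first any-match kept as fallback) instead of A's two passes.


-- ===== PORT A =====
-- A: two passes — first candidate containing all lowered keywords, else first containing any, else "".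
def pvLoopAll (candidates : List String) (lowered : List String) : Option String :=
  match candidates with
  | [] => none
  | c :: rest =>
    let source := PySem.Str.lower c
    if lowered.all (fun keyword => PySem.Str.isIn keyword source) then some c
    else pvLoopAll rest lowered

def pvLoopAny (candidates : List String) (lowered : List String) : Option String :=
  match candidates with
  | [] => none
  | c :: rest =>
    let source := PySem.Str.lower c
    if lowered.any (fun keyword => PySem.Str.isIn keyword source) then some c
    else pvLoopAny rest lowered

def pick_device (candidates : List String) (keywords : List String) : String :=
  let lowered := keywords.map PySem.Str.lower
  match pvLoopAll candidates lowered with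
  | some c => c
  | none =>
    match pvLoopAny candidates lowered with
    | some c => c
    | none => ""

-- ===== PORT B =====
-- B: single pass; return an all-match at once, record the first any-match as fallback.
def pvLoopB (candidates : List String) (lowered : List String) (fallback : Option String) : String :=
  match candidates with
  | [] => fallback.getD ""
  | c :: rest =>
    let source := PySem.Str.lower c
    if lowered.all (fun keyword => PySem.Str.isIn keyword source) then c
    else
      pvLoopB rest lowered
        (if fallback.isNone && lowered.any (fun keyword => PySem.Str.isIn keyword source)
         then some c else fallback)

def pick_device_alt (candidates : List String) (keywords : List String) : String :=
  pvLoopB candidates (keywords.map PySem.Str.lower) none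

-- ===== PRECONDITION & SPEC =====
def Spec_pick_device (candidates : List String) (keywords : List String) (out : String) : Prop := out = pick_device_alt candidates keywords
instance (candidates : List String) (keywords : List String) (out : String) : Decidable (Spec_pick_device candidates keywords out) := by unfold Spec_pick_device; infer_instance

-- ===== CLAIM (what is proved, stated in full; the proofs are below) =====
def Claim_equal_pick_device : Prop := ∀ (candidates : List String) (keywords : List String), Dom_pick_device candidates keywords → Spec_pick_device candidates keywords (pick_device candidates keywords)

-- ===== LEMMAS AND PROOFS =====
theorem pvLoopB_eq (candidates lowered : List String) (fallback : Option String) :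
    pvLoopB candidates lowered fallback =
      match pvLoopAll candidates lowered with
      | some c => c
      | none => ((fallback.orElse (fun _ => pvLoopAny candidates lowered)).getD "") := by
  induction candidates generalizing fallback with
  | nil => cases fallback <;> simp [pvLoopB, pvLoopAll, pvLoopAny, Option.orElse]
  | cons c rest ih =>
    simp only [pvLoopB, pvLoopAll, pvLoopAny]
    by_cases hall : (lowered.all fun keyword => PySem.Str.isIn keyword (PySem.Str.lower c)) = true
    · rw [if_pos hall, if_pos hall]
    · rw [if_neg hall, if_neg hall, ih]
      cases fallback with
      | some x => simp [Option.orElse]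
      | none =>
        by_cases hany : (lowered.any fun keyword => PySem.Str.isIn keyword (PySem.Str.lower c)) = true
        · rw [if_pos (by simpa using hany), if_pos hany]
          cases pvLoopAll rest lowered <;> simp [Option.orElse]
        · rw [if_neg (by simpa using hany), if_neg hany]

-- ===== VERDICT (by name: the statement is the Claim_ definition above) =====
theorem pick_device_spec : Claim_equal_pick_device := by
  intro candidates keywords _
  unfold Spec_pick_device pick_device pick_device_alt
  rw [pvLoopB_eq]
  cases ha : pvLoopAll candidates (keywords.map PySem.Str.lower) with
  | some c => simp [ha]
  | none =>
    cases hb : pvLoopAny candidates (keywords.map PySem.Str.lower) with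
    | some c => simp [ha, hb, Option.orElse]
    | none => simp [ha, hb, Option.orElse]
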